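-- pv_equiv track=rewrite | github.com/amrut-prabhu/breakfast-actions-classifier | read_datasetBreakfast.py | get_label_bounds
-- ===== SOURCE A (Python) =====
-- def get_label_bounds(data_labels):
--     labels_uniq = []
--     labels_uniq_loc = []
--     for kki in range(0, len(data_labels)):
--         uniq_group, indc_group = get_label_length_seq(data_labels[kki])
--         labels_uniq.append(uniq_group[1:-1])
--         labels_uniq_loc.append(indc_group[1:-1])
--     return labels_uniq, labels_uniq_loc
--
-- def get_label_length_seq(content):
--     label_seq = []
--     length_seq = []
--     start = 0
--     length_seq.append(0)
--     for i in range(len(content)):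
--         if content[i] != content[start]:
--             label_seq.append(content[start])
--             length_seq.append(i)
--             start = i
--     label_seq.append(content[start])
--     length_seq.append(len(content))
--
--     return label_seq, length_seq
-- ===== SOURCE B (Python) =====
-- def _rle(content):
--     # Stage 1: run-length encode into (value, count) pairs.
--     runs = []
--     for x in content:
--         if runs and runs[-1][0] == x:
--             runs[-1] = (x, runs[-1][1] + 1)
--         else:
--             runs.append((x, 1))
--     return runs
--
--
-- def get_label_bounds(data_labels):
--     labels_uniq = []
--     labels_uniq_loc = []
--     for content in data_labels:
--         runs = _rle(content)
--         # Stage 2: trimmed labels are the RLE values without first/last run.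
--         labels_uniq.append([v for v, _ in runs[1:-1]])
--         # Stage 3: interior boundaries are prefix sums of counts of all but the last run.
--         loc, total = [], 0
--         for _, c in runs[:-1]:
--             total += c
--             loc.append(total)
--         labels_uniq_loc.append(loc)
--     return labels_uniq, labels_uniq_loc
-- ===== Notes on version B (the rewrite author's own statement) =====
-- stated objective: alternative
-- what changed: Replaces the index loop tracking a run-start and pushing boundary indices and labels into two lists that are then sliced [1:-1] by a staged pipeline over a run-length-encoding intermediate: first build (value,count) pairs, then take the trimmed labels from the RLE values and the interior boundaries as prefix sums of the counts of all but the last run.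
-- outside the precondition, e.g. on get_label_bounds([[]]): A raises IndexError, B returns ([[]], [[]])
import Mathlib
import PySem

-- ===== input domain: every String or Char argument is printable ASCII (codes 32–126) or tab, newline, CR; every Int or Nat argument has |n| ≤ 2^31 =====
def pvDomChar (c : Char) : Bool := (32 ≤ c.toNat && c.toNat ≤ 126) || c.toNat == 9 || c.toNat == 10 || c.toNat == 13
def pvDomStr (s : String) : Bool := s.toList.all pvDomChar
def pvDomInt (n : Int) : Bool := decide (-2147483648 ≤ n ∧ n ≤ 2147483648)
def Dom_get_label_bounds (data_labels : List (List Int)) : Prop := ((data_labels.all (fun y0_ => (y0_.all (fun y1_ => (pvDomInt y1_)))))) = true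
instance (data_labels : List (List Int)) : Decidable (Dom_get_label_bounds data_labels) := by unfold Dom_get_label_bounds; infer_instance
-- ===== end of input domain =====

-- B computes each sequence's trimmed labels and interior boundaries from a run-length-encoding
-- intermediate (value,count pairs + prefix sums of counts) instead of A's run-start index loop;
-- objective: alternative (same cost). Return-value equivalence only.


-- ===== PORT A =====
-- loop body of get_label_length_seq: state (label_seq, length_seq, start)
def stepA (content : List Int) (s : List Int × List Int × Nat) (i : Nat) : List Int × List Int × Nat :=
  if PySem.List.pyGetD content (i : Int) 0 ≠ PySem.List.pyGetD content (s.2.2 : Int) 0 then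
    (s.1 ++ [PySem.List.pyGetD content (s.2.2 : Int) 0], s.2.1 ++ [(i : Int)], i)
  else s

-- 'for i in range(len(content))' visits 0 ≤ i < len, ported as List.range;
-- content[i] / content[start] are pyGetD (in range whenever content ≠ [], which Pre_ guarantees)
def get_label_length_seq (content : List Int) : List Int × List Int :=
  let s := (List.range content.length).foldl (stepA content) ([], [0], 0)
  (s.1 ++ [PySem.List.pyGetD content (s.2.2 : Int) 0], s.2.1 ++ [(content.length : Int)])

def get_label_bounds (data_labels : List (List Int)) : List (List Int) × List (List Int) :=
  data_labels.foldl
    (fun acc content =>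
      let ug := get_label_length_seq content
      (acc.1 ++ [PySem.List.slice ug.1 (some 1) (some (-1))],
       acc.2 ++ [PySem.List.slice ug.2 (some 1) (some (-1))]))
    ([], [])

-- ===== PORT B =====
-- _rle loop body: extend the last run or start a new one
def rleStep (runs : List (Int × Int)) (x : Int) : List (Int × Int) :=
  match runs.getLast? with
  | some p => if p.1 = x then runs.dropLast ++ [(x, p.2 + 1)] else runs ++ [(x, 1)]
  | none => [(x, 1)]

def rle (content : List Int) : List (Int × Int) := content.foldl rleStep []

-- the prefix-sum loop of Source B: state (loc, total)
def locStep (s : List Int × Int) (p : Int × Int) : List Int × Int :=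
  (s.1 ++ [s.2 + p.2], s.2 + p.2)

def runBounds (content : List Int) : List Int × List Int :=
  let runs := rle content
  ((PySem.List.slice runs (some 1) (some (-1))).map Prod.fst,
   ((PySem.List.slice runs none (some (-1))).foldl locStep ([], 0)).1)

def get_label_bounds_alt (data_labels : List (List Int)) : List (List Int) × List (List Int) :=
  data_labels.foldl
    (fun acc content =>
      let r := runBounds content
      (acc.1 ++ [r.1], acc.2 ++ [r.2]))
    ([], [])

-- ===== PRECONDITION & SPEC =====
-- Pre_ excludes inputs containing an empty sequence, on which A raises IndexError
-- (content[start] on an empty list); B returns empty label and boundary lists for such a sequence.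
def Pre_get_label_bounds (data_labels : List (List Int)) : Prop :=
  ∀ content ∈ data_labels, content ≠ []
instance (data_labels : List (List Int)) : Decidable (Pre_get_label_bounds data_labels) := by
  unfold Pre_get_label_bounds; infer_instance

def pvWitness_get_label_bounds : List (List Int) := [[1, 1, 2, 2, 3], [4], [5, 5]]

def Spec_get_label_bounds (data_labels : List (List Int)) (out : List (List Int) × List (List Int)) : Prop := out = get_label_bounds_alt data_labels
instance (data_labels : List (List Int)) (out : List (List Int) × List (List Int)) : Decidable (Spec_get_label_bounds data_labels out) := by unfold Spec_get_label_bounds; infer_instance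

-- ===== CLAIM (what is proved, stated in full; the proofs are below) =====
def Claim_equal_get_label_bounds : Prop := ∀ (data_labels : List (List Int)), Dom_get_label_bounds data_labels → Pre_get_label_bounds data_labels → Spec_get_label_bounds data_labels (get_label_bounds data_labels)


-- ===== LEMMAS AND PROOFS =====

-- prefix sums of the counts: proof-side name for Source B's loop
def bnds (rs : List (Int × Int)) : List Int × Int := rs.foldl locStep ([], 0)

theorem bnds_concat (rs : List (Int × Int)) (p : Int × Int) :
    bnds (rs ++ [p]) = ((bnds rs).1 ++ [(bnds rs).2 + p.2], (bnds rs).2 + p.2) := by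
  simp [bnds, List.foldl_append, locStep]

-- joint loop invariant relating A's loop state after i iterations to the RLE of content.take i
theorem loop_inv (content : List Int) (i : ℕ) (h1 : 1 ≤ i) (h2 : i ≤ content.length) :
    ((List.range i).foldl (stepA content) ([], [0], 0)).1
      = (rle (content.take i)).dropLast.map Prod.fst
  ∧ ((List.range i).foldl (stepA content) ([], [0], 0)).2.1
      = 0 :: (bnds (rle (content.take i)).dropLast).1
  ∧ ((((List.range i).foldl (stepA content) ([], [0], 0)).2.2 : ℕ) : Int)
      = (bnds (rle (content.take i)).dropLast).2
  ∧ (bnds (rle (content.take i))).2 = (i : Int)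
  ∧ ∃ v c R₀, rle (content.take i) = R₀ ++ [(v, c)]
      ∧ content.getD ((List.range i).foldl (stepA content) ([], [0], 0)).2.2 0 = v := by
  induction i, h1 using Nat.le_induction with
  | base =>
      have hne : content ≠ [] := by intro h; rw [h] at h2; simp at h2
      obtain ⟨a, t, rfl⟩ := List.exists_cons_of_ne_nil hne
      refine ⟨?_, ?_, ?_, ?_, a, 1, [], ?_, ?_⟩ <;>
        simp [stepA, rle, rleStep, bnds, locStep]
  | succ i hi ih =>
      have hlt : i < content.length := by omega
      obtain ⟨ih1, ih2, ih3, ih4, v, c, R₀, hR, hv⟩ := ih (by omega)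
      set sA := (List.range i).foldl (stepA content) ([], [0], 0) with hsA
      have hfoldA : (List.range (i+1)).foldl (stepA content) ([], [0], 0) = stepA content sA i := by
        rw [List.range_succ, List.foldl_append]; rfl
      have htake : content.take (i+1) = content.take i ++ [content[i]] := by
        rw [List.take_add_one]; simp [List.getElem?_eq_getElem hlt]
      have hrle : rle (content.take (i+1)) = rleStep (rle (content.take i)) content[i] := by
        unfold rle; rw [htake, List.foldl_append]; rfl
      have hdropR : (rle (content.take i)).dropLast = R₀ := by rw [hR]; exact List.dropLast_concat
      have hlast : (rle (content.take i)).getLast? = some (v, c) := by rw [hR]; simp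
      have hgi : PySem.List.pyGetD content ((i:ℕ) : Int) 0 = content[i] := by
        rw [PySem.List.pyGetD_natCast]; simp [List.getElem?_eq_getElem hlt]
      have hgs : PySem.List.pyGetD content ((sA.2.2 : ℕ) : Int) 0 = v := by
        rw [PySem.List.pyGetD_natCast]; exact hv
      have hsum : (bnds R₀).2 + c = (i : Int) := by
        have h := congrArg Prod.snd (bnds_concat R₀ (v, c))
        rw [← hR] at h; simp at h; rw [← h]; exact ih4
      rw [hfoldA, hrle]
      by_cases heq : v = content[i]
      · -- run continues: A does nothing, RLE extends the last count
        have hA : stepA content sA i = sA := by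
          unfold stepA; rw [hgi, hgs, heq]; simp
        have hB : rleStep (rle (content.take i)) content[i]
            = R₀ ++ [(content[i], c + 1)] := by
          unfold rleStep; rw [hlast]; simp [heq, hdropR]
        rw [hA, hB]
        have hd : (R₀ ++ [(content[i], c + 1)]).dropLast = R₀ := List.dropLast_concat
        refine ⟨by rw [hd, ← hdropR]; exact ih1,
                by rw [hd, ← hdropR]; exact ih2,
                by rw [hd, ← hdropR]; exact ih3,
                ?_, content[i], c + 1, R₀, rfl, hv.trans heq⟩
        have h := congrArg Prod.snd (bnds_concat R₀ (content[i], c + 1))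
        simp only [h]; push_cast; omega
      · -- run changes: A pushes label and boundary, RLE starts a new run
        have hA : stepA content sA i = (sA.1 ++ [v], sA.2.1 ++ [(i : Int)], i) := by
          unfold stepA; rw [hgi, hgs]; simp [Ne.symm heq]
        have hB : rleStep (rle (content.take i)) content[i]
            = (rle (content.take i)) ++ [(content[i], 1)] := by
          unfold rleStep; rw [hlast]; simp [heq]
        rw [hA, hB]
        have hd : ((rle (content.take i)) ++ [(content[i], 1)]).dropLast = rle (content.take i) :=
          List.dropLast_concat
        refine ⟨?_, ?_, ?_, ?_, content[i], 1, rle (content.take i), rfl, ?_⟩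
        · rw [hd, ih1, hdropR, hR]; simp
        · rw [hd, ih2, hdropR]
          have h := congrArg Prod.fst (bnds_concat R₀ (v, c))
          rw [← hR] at h; simp at h; rw [h, hsum]; simp
        · rw [hd]; simpa using ih4.symm
        · have h := congrArg Prod.snd (bnds_concat (rle (content.take i)) (content[i], 1))
          simp only [h, ih4]; push_cast; ring
        · simp [List.getD_eq_getElem?_getD, List.getElem?_eq_getElem hlt]


-- [1:-1] of a list with one element added at each end is the middle part
theorem slice_mid (x y : Int) (l : List Int) :
    PySem.List.slice (x :: (l ++ [y])) (some 1) (some (-1)) = l := by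
  simp [PySem.List.slice, PySem.List.clampIdx]
  rw [if_neg (by omega)]
  simp

-- [1:-1] commutes with map
theorem slice_map_mid {α β : Type} (f : α → β) (l : List α) :
    PySem.List.slice (l.map f) (some 1) (some (-1)) = (PySem.List.slice l (some 1) (some (-1))).map f := by
  simp [PySem.List.slice, PySem.List.clampIdx]

-- per-sequence agreement
theorem content_eq (content : List Int) (hc : content ≠ []) :
    (PySem.List.slice (get_label_length_seq content).1 (some 1) (some (-1)),
     PySem.List.slice (get_label_length_seq content).2 (some 1) (some (-1)))
      = runBounds content := by
  have hn : 1 ≤ content.length := List.length_pos_iff.mpr hc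
  obtain ⟨h1, h2, h3, h4, v, c, R₀, hR, hv⟩ := loop_inv content content.length hn le_rfl
  simp only [List.take_length] at h1 h2 h3 h4 hR hv
  unfold get_label_length_seq runBounds
  set sA := (List.range content.length).foldl (stepA content) ([], [0], 0) with hsA
  have hdropR : (rle content).dropLast = R₀ := by rw [hR]; exact List.dropLast_concat
  have hget : PySem.List.pyGetD content ((sA.2.2 : ℕ) : Int) 0 = v := by
    rw [PySem.List.pyGetD_natCast]; exact hv
  have hfst : sA.1 ++ [v] = (rle content).map Prod.fst := by
    rw [h1, hdropR, hR]; simp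
  have hloc : (PySem.List.slice (rle content) none (some (-1))).foldl locStep ([], 0)
      = bnds (rle content).dropLast := by
    rw [PySem.List.slice_to_neg_one]; rfl
  refine Prod.ext ?_ ?_
  · show PySem.List.slice (sA.1 ++ [PySem.List.pyGetD content (sA.2.2 : Int) 0]) (some 1) (some (-1))
      = (PySem.List.slice (rle content) (some 1) (some (-1))).map Prod.fst
    rw [hget, hfst, slice_map_mid]
  · show PySem.List.slice (sA.2.1 ++ [(content.length : Int)]) (some 1) (some (-1))
      = ((PySem.List.slice (rle content) none (some (-1))).foldl locStep ([], 0)).1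
    rw [hloc, h2, hdropR]
    show PySem.List.slice (0 :: ((bnds R₀).1 ++ [(content.length : Int)])) (some 1) (some (-1)) = _
    rw [slice_mid]

-- A's outer accumulator fold, with the accumulator generalized
theorem outer_fold (dl : List (List Int)) (hp : ∀ c ∈ dl, c ≠ [])
    (acc : List (List Int) × List (List Int)) :
    dl.foldl
      (fun acc content =>
        let ug := get_label_length_seq content
        (acc.1 ++ [PySem.List.slice ug.1 (some 1) (some (-1))],
         acc.2 ++ [PySem.List.slice ug.2 (some 1) (some (-1))]))
      acc
    = dl.foldl
        (fun acc content =>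
          let r := runBounds content
          (acc.1 ++ [r.1], acc.2 ++ [r.2]))
        acc := by
  induction dl generalizing acc with
  | nil => rfl
  | cons c t ih =>
      rw [List.foldl_cons, List.foldl_cons, ih (fun x hx => hp x (List.mem_cons_of_mem _ hx))]
      have h := content_eq c (hp c List.mem_cons_self)
      simp only [← h]

-- ===== VERDICT (by name: the statement is the Claim_ definition above) =====
theorem get_label_bounds_spec : Claim_equal_get_label_bounds := by
  intro dl _ hp
  unfold Spec_get_label_bounds get_label_bounds get_label_bounds_alt
  exact outer_fold dl hp ([], [])
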